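-- pv_equiv track=rewrite | github.com/zyma98/pie | backend/backend-pytorch/symphony-backend/l4m.py | get_image_position_ids
-- ===== SOURCE A (Python) =====
-- def get_image_position_ids(offset: int, patch_h: int, patch_w: int) -> list[tuple[int, int, int]]:
--     output_ids = []
--     for i in range(patch_h * patch_w):
--         output_ids.append((
--             offset,
--             offset + i // patch_w,
--             offset + i % patch_w
--         ))
--     return output_ids
-- ===== SOURCE B (Python) =====
-- def get_image_position_ids(offset: int, patch_h: int, patch_w: int) -> list[tuple[int, int, int]]:
--     if patch_h <= 0 or patch_w <= 0:
--         return []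
--     return [(offset, offset + r, offset + c)
--             for r in range(patch_h)
--             for c in range(patch_w)]
-- ===== Notes on version B (the rewrite author's own statement) =====
-- stated objective: idiomatic
-- what changed: A single 2-D comprehension traverses the row/column grid directly, replacing A's flat loop over patch_h*patch_w that decodes row and column with i//patch_w and i%patch_w and appends to an accumulator.
-- intended difference: When both patch_h and patch_w are negative, A's flat range(patch_h*patch_w) is nonempty and it returns spurious tuples built by floor-dividing indices by the negative width, while B returns the empty list, the intended result for non-positive dimensions. — e.g. on get_image_position_ids(0, -1, -1): A returns [(0, 0, 0)], B returns []
import Mathlib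
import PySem

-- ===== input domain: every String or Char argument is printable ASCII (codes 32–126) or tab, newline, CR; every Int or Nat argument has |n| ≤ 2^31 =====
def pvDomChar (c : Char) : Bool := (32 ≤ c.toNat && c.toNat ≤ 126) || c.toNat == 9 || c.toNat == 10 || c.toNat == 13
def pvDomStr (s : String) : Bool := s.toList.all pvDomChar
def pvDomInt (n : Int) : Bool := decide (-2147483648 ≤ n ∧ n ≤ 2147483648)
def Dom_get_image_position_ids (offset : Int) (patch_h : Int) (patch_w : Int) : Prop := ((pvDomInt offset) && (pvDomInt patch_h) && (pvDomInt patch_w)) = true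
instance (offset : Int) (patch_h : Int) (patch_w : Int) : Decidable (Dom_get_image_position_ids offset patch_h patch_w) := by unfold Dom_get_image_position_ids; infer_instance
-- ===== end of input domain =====

-- B is a single 2-D comprehension over rows and columns instead of A's flat accumulator loop
-- that decodes a counter with // and % (idiomatic decomposition); on patch_h < 0 ∧ patch_w < 0
-- (stated D_) A returns spurious tuples while B returns [], the intended value.


-- ===== PORT A =====
-- flat loop over range(patch_h * patch_w); row/col recovered with i // patch_w and i % patch_w
def get_image_position_ids (offset : Int) (patch_h : Int) (patch_w : Int) : List (Int × Int × Int) :=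
  (PySem.List.pyRange 0 (patch_h * patch_w) 1).foldl
    (fun acc i => acc ++ [(offset, offset + PySem.Int.floordiv i patch_w, offset + PySem.Int.mod i patch_w)]) []

-- ===== PORT B =====
-- empty-dimension short-circuit, then the comprehension
-- [(offset, offset+r, offset+c) for r in range(patch_h) for c in range(patch_w)];
-- range(n) for an Int n is List.range n.toNat, the comprehension is flatMap/map
def get_image_position_ids_alt (offset : Int) (patch_h : Int) (patch_w : Int) : List (Int × Int × Int) :=
  if patch_h ≤ 0 ∨ patch_w ≤ 0 then []
  else (List.range patch_h.toNat).flatMap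
    (fun (r : Nat) => (List.range patch_w.toNat).map
      (fun (c : Nat) => (offset, offset + (r : Int), offset + (c : Int))))

-- ===== PRECONDITION & SPEC =====
-- When both patch_h and patch_w are negative, A's flat range(patch_h*patch_w) is nonempty and A
-- returns spurious tuples built by floor-dividing indices by the negative width, while B returns
-- the empty list — the intended result for non-positive dimensions.
def D_get_image_position_ids (offset : Int) (patch_h : Int) (patch_w : Int) : Prop :=
  patch_h < 0 ∧ patch_w < 0
instance (offset : Int) (patch_h : Int) (patch_w : Int) : Decidable (D_get_image_position_ids offset patch_h patch_w) := by unfold D_get_image_position_ids; infer_instance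

def Spec_get_image_position_ids (offset : Int) (patch_h : Int) (patch_w : Int) (out : List (Int × Int × Int)) : Prop := ¬ D_get_image_position_ids offset patch_h patch_w → out = get_image_position_ids_alt offset patch_h patch_w
instance (offset : Int) (patch_h : Int) (patch_w : Int) (out : List (Int × Int × Int)) : Decidable (Spec_get_image_position_ids offset patch_h patch_w out) := by unfold Spec_get_image_position_ids; infer_instance

def pvDiffWitness_get_image_position_ids : Int × Int × Int := (0, -1, -1)
def pvDiffWitnessOut_get_image_position_ids : (List (Int × Int × Int)) × (List (Int × Int × Int)) := ([(0, 0, 0)], [])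

-- ===== CLAIM (what is proved, stated in full; the proofs are below) =====
def Claim_unchanged_get_image_position_ids : Prop := ∀ (offset : Int) (patch_h : Int) (patch_w : Int), Dom_get_image_position_ids offset patch_h patch_w → Spec_get_image_position_ids offset patch_h patch_w (get_image_position_ids offset patch_h patch_w)
def Claim_changed_get_image_position_ids : Prop := Dom_get_image_position_ids (pvDiffWitness_get_image_position_ids.1) (pvDiffWitness_get_image_position_ids.2.1) (pvDiffWitness_get_image_position_ids.2.2) ∧ D_get_image_position_ids (pvDiffWitness_get_image_position_ids.1) (pvDiffWitness_get_image_position_ids.2.1) (pvDiffWitness_get_image_position_ids.2.2) ∧ get_image_position_ids (pvDiffWitness_get_image_position_ids.1) (pvDiffWitness_get_image_position_ids.2.1) (pvDiffWitness_get_image_position_ids.2.2) = pvDiffWitnessOut_get_image_position_ids.1 ∧ get_image_position_ids_alt (pvDiffWitness_get_image_position_ids.1) (pvDiffWitness_get_image_position_ids.2.1) (pvDiffWitness_get_image_position_ids.2.2) = pvDiffWitnessOut_get_image_position_ids.2 ∧ pvDiffWitnessOut_get_image_position_ids.1 ≠ pvDiffWitnessOut_get_image_position_ids.2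
def Claim_exact_get_image_position_ids : Prop := ∀ (offset : Int) (patch_h : Int) (patch_w : Int), Dom_get_image_position_ids offset patch_h patch_w → D_get_image_position_ids offset patch_h patch_w → get_image_position_ids offset patch_h patch_w ≠ get_image_position_ids_alt offset patch_h patch_w

-- ===== LEMMAS AND PROOFS =====

theorem a_eq_map (offset patch_h patch_w : Int) :
    get_image_position_ids offset patch_h patch_w =
      (PySem.List.pyRange 0 (patch_h * patch_w) 1).map
        (fun i => (offset, offset + PySem.Int.floordiv i patch_w,
                   offset + PySem.Int.mod i patch_w)) := by
  unfold get_image_position_ids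
  exact PySem.List.foldl_append_singleton_eq_map _ _ _

-- the grid identity: flat index decoding over a Nat range = direct 2-D traversal
theorem grid_lemma (offset w : Int) (hw : 0 < w) (hn : Nat) :
    (List.range (hn * w.toNat)).map
      (fun (i : Nat) => ((offset, offset + PySem.Int.floordiv (i : Int) w,
                  offset + PySem.Int.mod (i : Int) w) : Int × Int × Int))
    = (List.range hn).flatMap
        (fun (r : Nat) => (List.range w.toNat).map
          (fun (c : Nat) => ((offset, offset + (r : Int), offset + (c : Int)) : Int × Int × Int))) := by
  induction hn with
  | zero => simp
  | succ n ih =>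
    have hwn : 0 < w.toNat := by omega
    rw [Nat.succ_mul, List.range_add, List.map_append, ih, List.range_succ,
        List.flatMap_append]
    congr 1
    simp only [List.flatMap_cons, List.flatMap_nil, List.append_nil, List.map_map]
    apply List.map_congr_left
    intro c hc
    have hclt : c < w.toNat := List.mem_range.mp hc
    have hdiv : PySem.Int.floordiv ((n * w.toNat + c : Nat) : Int) w = (n : Int) := by
      rw [show w = ((w.toNat : Nat) : Int) from by omega]
      rw [PySem.Int.floordiv_natCast]
      congr 1
      simp only [Int.toNat_natCast]
      rw [Nat.mul_comm n w.toNat, Nat.mul_add_div hwn, Nat.div_eq_of_lt hclt]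
      omega
    have hmod : PySem.Int.mod ((n * w.toNat + c : Nat) : Int) w = (c : Int) := by
      rw [show w = ((w.toNat : Nat) : Int) from by omega]
      rw [PySem.Int.mod_natCast]
      congr 1
      simp only [Int.toNat_natCast]
      rw [Nat.mul_comm n w.toNat, Nat.mul_add_mod, Nat.mod_eq_of_lt hclt]
    simp only [Function.comp, hdiv, hmod]

-- ===== VERDICT (by name: the statement is the Claim_ definition above) =====
theorem get_image_position_ids_spec : Claim_unchanged_get_image_position_ids := by
  intro offset patch_h patch_w _ hnD
  rw [a_eq_map]
  unfold get_image_position_ids_alt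
  by_cases hpos : 0 < patch_h ∧ 0 < patch_w
  · obtain ⟨hh, hw⟩ := hpos
    rw [if_neg (by omega : ¬ (patch_h ≤ 0 ∨ patch_w ≤ 0))]
    rw [PySem.List.pyRange_one 0 (patch_h * patch_w)]
    simp only [sub_zero, List.map_map]
    have htn : (patch_h * patch_w).toNat = patch_h.toNat * patch_w.toNat := by
      rw [Int.toNat_mul (by omega) (by omega)]
    rw [htn]
    have := grid_lemma offset patch_w hw patch_h.toNat
    rw [← this]
    apply List.map_congr_left
    intro i _
    simp only [Function.comp, zero_add]
  · -- not both positive and not both negative: the product is ≤ 0, both sides are []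
    have hD : ¬ (patch_h < 0 ∧ patch_w < 0) := hnD
    have hprod : patch_h * patch_w ≤ 0 := by
      rcases lt_trichotomy patch_h 0 with h | h | h
      · exact mul_nonpos_of_nonpos_of_nonneg (le_of_lt h) (by omega)
      · simp [h]
      · exact mul_nonpos_of_nonneg_of_nonpos (le_of_lt h) (by omega)
    rw [PySem.List.pyRange_one_eq_nil hprod, List.map_nil]
    rw [if_pos (by by_contra hcon; exact hpos ⟨by omega, by omega⟩)]

theorem get_image_position_ids_changed : Claim_changed_get_image_position_ids := by
  unfold Claim_changed_get_image_position_ids; decide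

theorem get_image_position_ids_tight : Claim_exact_get_image_position_ids := by
  intro offset patch_h patch_w _ hD
  obtain ⟨hh, hw⟩ := hD
  have hBnil : get_image_position_ids_alt offset patch_h patch_w = [] := by
    unfold get_image_position_ids_alt
    rw [if_pos (Or.inl (le_of_lt hh))]
  rw [hBnil, a_eq_map]
  have hprod : 0 < patch_h * patch_w := mul_pos_of_neg_of_neg hh hw
  rw [PySem.List.pyRange_one_cons (by omega : (0:Int) < patch_h * patch_w)]
  simp
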